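-- pv_equiv track=rewrite | github.com/lymanhurd/cribbage | utils.py | is_run
-- ===== SOURCE A (Python) =====
-- from typing import List
--
-- def is_run(sub_seq: List[int]) -> bool:
--     seq_len = len(sub_seq)
--     val_seq = [s % 13 for s in sub_seq]
--     if max(val_seq) - min(val_seq) != seq_len - 1:
--         return False
--     if len(set(val_seq)) != seq_len:
--         return False
--     return True
-- ===== SOURCE B (Python) =====
-- from typing import List
--
--
-- def is_run(sub_seq: List[int]) -> bool:
--     vals = sorted(s % 13 for s in sub_seq)
--     return all(b - a == 1 for a, b in zip(vals, vals[1:]))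
-- ===== Notes on version B (the rewrite author's own statement) =====
-- stated objective: simpler
-- what changed: Replaces A's max/min-span test plus set-cardinality uniqueness check by sorting the mod-13 values once and verifying in a single adjacency pass that every consecutive difference is exactly 1 (a diff of 0 catches duplicates, >1 catches gaps).
import Mathlib
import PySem

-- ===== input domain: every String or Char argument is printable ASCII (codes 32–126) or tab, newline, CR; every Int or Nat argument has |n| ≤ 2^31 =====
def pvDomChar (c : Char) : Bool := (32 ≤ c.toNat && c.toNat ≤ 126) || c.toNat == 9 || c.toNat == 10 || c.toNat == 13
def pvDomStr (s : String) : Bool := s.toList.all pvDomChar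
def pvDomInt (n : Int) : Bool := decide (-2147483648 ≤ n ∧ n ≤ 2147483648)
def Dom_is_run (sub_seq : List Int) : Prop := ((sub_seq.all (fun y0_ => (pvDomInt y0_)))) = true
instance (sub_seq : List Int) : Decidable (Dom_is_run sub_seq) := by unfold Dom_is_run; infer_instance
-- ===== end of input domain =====

-- B replaces A's max/min-span + set-cardinality test by one sorted adjacency scan; objective: simpler.
-- A raises ValueError on the empty list (max([])); Pre_ excludes exactly that input (B happens to return True there).


-- ===== PORT A =====
def is_run (sub_seq : List Int) : Bool :=
  let seq_len := sub_seq.length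
  let val_seq := sub_seq.map (fun s => PySem.Int.mod s 13)
  match PySem.List.max? val_seq (fun x => x), PySem.List.min? val_seq (fun x => x) with
  | some mx, some mn =>
      if mx - mn ≠ (seq_len : Int) - 1 then false
      else if ((PySem.Set.ofList val_seq).length : Int) ≠ (seq_len : Int) then false
      else true
  | _, _ => false  -- unreachable under Pre_: Python's max([]) raises ValueError there

-- ===== PORT B =====
def is_run_alt (sub_seq : List Int) : Bool :=
  let vals := PySem.List.sorted (sub_seq.map (fun s => PySem.Int.mod s 13)) (fun x => x) false
  (vals.zip (PySem.List.slice vals (some 1) none)).all (fun p => p.2 - p.1 == 1)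

-- ===== PRECONDITION & SPEC =====
-- Pre_ excludes exactly the empty list, on which A raises ValueError (max of an empty sequence).
def Pre_is_run (sub_seq : List Int) : Prop := sub_seq ≠ []
instance (sub_seq : List Int) : Decidable (Pre_is_run sub_seq) := by unfold Pre_is_run; infer_instance
def pvWitness_is_run : List Int := ([5, 19, 7])

def Spec_is_run (sub_seq : List Int) (out : Bool) : Prop := out = is_run_alt sub_seq
instance (sub_seq : List Int) (out : Bool) : Decidable (Spec_is_run sub_seq out) := by unfold Spec_is_run; infer_instance

-- ===== CLAIM (what is proved, stated in full; the proofs are below) =====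
def Claim_equal_is_run : Prop := ∀ (sub_seq : List Int), Dom_is_run sub_seq → Pre_is_run sub_seq → Spec_is_run sub_seq (is_run sub_seq)

-- ===== LEMMAS AND PROOFS =====

/-- The integer range a, a+1, …, a+n-1 (proof-side helper). -/
def rangeFrom : Int → Nat → List Int
  | _, 0 => []
  | a, n+1 => a :: rangeFrom (a+1) n

theorem rangeFrom_length (a : Int) (n : Nat) : (rangeFrom a n).length = n := by
  induction n generalizing a with
  | zero => rfl
  | succ k ih => simp [rangeFrom, ih]

theorem rangeFrom_getElem (a : Int) (n : Nat) (i : Nat) (h : i < n) :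
    (rangeFrom a n)[i]'(by rw [rangeFrom_length]; exact h) = a + i := by
  induction n generalizing a i with
  | zero => omega
  | succ k ih =>
    cases i with
    | zero => simp [rangeFrom]
    | succ j =>
      have := ih (a+1) j (by omega)
      simp [rangeFrom, this]
      omega

theorem mem_rangeFrom (a : Int) (n : Nat) (x : Int) :
    x ∈ rangeFrom a n ↔ ∃ i : Nat, i < n ∧ x = a + i := by
  induction n generalizing a with
  | zero => simp [rangeFrom]
  | succ k ih =>
    simp only [rangeFrom, List.mem_cons, ih]
    constructor
    · rintro (rfl | ⟨i, hi, rfl⟩)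
      · exact ⟨0, by omega, by simp⟩
      · exact ⟨i+1, by omega, by push_cast; ring⟩
    · rintro ⟨i, hi, rfl⟩
      cases i with
      | zero => left; simp
      | succ j => right; exact ⟨j, by omega, by push_cast; ring⟩

theorem rangeFrom_pairwise_lt (a : Int) (n : Nat) : (rangeFrom a n).Pairwise (· < ·) := by
  induction n generalizing a with
  | zero => simp [rangeFrom]
  | succ k ih =>
    refine List.Pairwise.cons ?_ (ih (a+1))
    intro x hx
    rw [mem_rangeFrom] at hx
    obtain ⟨i, hi, rfl⟩ := hx
    omega

/-- B's adjacency scan succeeds exactly when the list is the consecutive range from its head. -/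
theorem adj_iff (t : List Int) (a : Int) :
    (((a :: t).zip t).all (fun p => p.2 - p.1 == 1)) = true ↔ a :: t = rangeFrom a (t.length + 1) := by
  induction t generalizing a with
  | nil => simp [rangeFrom]
  | cons b t' ih =>
    simp only [List.zip_cons_cons, List.all_cons, Bool.and_eq_true, beq_iff_eq, ih b]
    constructor
    · rintro ⟨h1, h2⟩
      have hb : b = a + 1 := by omega
      subst hb
      simp [rangeFrom, List.length_cons] at h2 ⊢
      exact h2
    · intro h
      simp only [rangeFrom, List.length_cons] at h
      have hb : b = a + 1 := by
        have := List.head_eq_of_cons_eq (List.tail_eq_of_cons_eq h)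
        omega
      constructor
      · omega
      · subst hb
        simpa [rangeFrom] using h

theorem strict_step (w : List Int) (hp : w.Pairwise (· < ·)) (i j : Nat) (hij : i ≤ j)
    (hj : j < w.length) : w[i]'(by omega) + ((j - i : Nat) : Int) ≤ w[j] := by
  rw [List.pairwise_iff_getElem] at hp
  induction j with
  | zero =>
    have : i = 0 := by omega
    subst this; simp
  | succ k ih =>
    by_cases hik : i = k + 1
    · subst hik; simp
    · have h1 := ih (by omega) (by omega)
      have h2 := hp k (k+1) (by omega) hj (by omega)
      have : ((k + 1 - i : Nat) : Int) = ((k - i : Nat) : Int) + 1 := by omega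
      omega

theorem ofList_length_eq_iff_nodup (l : List Int) :
    (PySem.Set.ofList l).length = l.length ↔ l.Nodup := by
  constructor
  · intro h
    have hperm : (PySem.Set.ofList l).Perm l.dedup := by
      rw [List.perm_ext_iff_of_nodup (PySem.Set.nodup_ofList l) (List.nodup_dedup l)]
      intro x
      rw [PySem.Set.mem_ofList, List.mem_dedup]
    have hlen : l.dedup.length = l.length := by
      rw [← hperm.length_eq, h]
    exact List.dedup_eq_self.mp ((List.dedup_sublist l).eq_of_length hlen)
  · intro h
    rw [PySem.Set.ofList_eq_self_of_nodup _ h]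

/-- The central equivalence on a nonempty value list. -/
theorem central (v : List Int) (hv : v ≠ []) (mx mn : Int)
    (hmx : PySem.List.max? v (fun x => x) = some mx)
    (hmn : PySem.List.min? v (fun x => x) = some mn) :
    ((mx - mn = (v.length : Int) - 1 ∧ (PySem.Set.ofList v).length = v.length) ↔
      (((PySem.List.sorted v (fun x => x) false).zip
        (PySem.List.sorted v (fun x => x) false).tail).all (fun p => p.2 - p.1 == 1)) = true) := by
  have hperm : (PySem.List.sorted v (fun x => x) false).Perm v := PySem.List.sorted_perm v _ _
  have hpair : (PySem.List.sorted v (fun x => x) false).Pairwise (· ≤ ·) := by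
    have := PySem.List.sorted_pairwise v (fun x => x); simpa using this
  have hwne : PySem.List.sorted v (fun x => x) false ≠ [] := by
    rw [Ne, PySem.List.sorted_eq_nil_iff]; exact hv
  have hmxmem : mx ∈ v := PySem.List.max?_mem hmx
  have hmxmax : ∀ y ∈ v, y ≤ mx := by have := PySem.List.max?_isMax hmx; simpa using this
  have hmnmem : mn ∈ v := PySem.List.min?_mem hmn
  have hmnmin : ∀ y ∈ v, mn ≤ y := by have := PySem.List.min?_isMin hmn; simpa using this
  obtain ⟨a, t, hw⟩ := List.exists_cons_of_ne_nil hwne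
  rw [hw] at hperm hpair ⊢
  have hlen : t.length + 1 = v.length := by simpa using hperm.length_eq
  rw [List.tail_cons, adj_iff, ofList_length_eq_iff_nodup]
  constructor
  · rintro ⟨hspan, hnd⟩
    -- A's two checks force the sorted list to be the consecutive range
    have hndw : (a :: t).Nodup := hperm.nodup_iff.mpr hnd
    have hlt : (a :: t).Pairwise (· < ·) := by
      have := hpair.and hndw
      exact this.imp (fun h => lt_of_le_of_ne h.1 h.2)
    have hgetmono : ∀ (i j : Nat) (hij : i ≤ j) (hj : j < (a :: t).length),
        (a :: t)[i]'(by omega) + ((j - i : Nat) : Int) ≤ (a :: t)[j] :=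
      fun i j hij hj => strict_step (a :: t) hlt i j hij hj
    -- identify mx and mn with the last and first elements
    have hlast_mem : (a :: t)[t.length]'(by simp) ∈ v := hperm.mem_iff.mp (List.getElem_mem _)
    have hhead_mem : a ∈ v := hperm.mem_iff.mp (by simp)
    obtain ⟨imx, himx, himx_eq⟩ := List.mem_iff_getElem.mp (hperm.mem_iff.mpr hmxmem)
    obtain ⟨imn, himn, himn_eq⟩ := List.mem_iff_getElem.mp (hperm.mem_iff.mpr hmnmem)
    have himx' : imx < t.length + 1 := by simpa using himx
    have himn' : imn < t.length + 1 := by simpa using himn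
    have hmx_le : mx ≤ (a :: t)[t.length]'(by simp) := by
      rcases Nat.lt_or_ge imx t.length with h | h
      · have hle := List.pairwise_iff_getElem.mp hpair imx t.length (by omega) (by simp) h
        calc mx = (a :: t)[imx]'himx := himx_eq.symm
          _ ≤ _ := hle
      · have : imx = t.length := by omega
        subst this
        exact le_of_eq himx_eq.symm
    have hmx_ge : (a :: t)[t.length]'(by simp) ≤ mx := hmxmax _ hlast_mem
    have hmn_le : mn ≤ a := hmnmin _ hhead_mem
    have hmn_ge : a ≤ mn := by
      rcases Nat.eq_zero_or_pos imn with h | h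
      · subst h
        exact le_of_eq himn_eq
      · have hle := List.pairwise_iff_getElem.mp hpair 0 imn (by omega) himn h
        calc a = (a :: t)[0]'(by simp) := by simp
          _ ≤ (a :: t)[imn]'himn := hle
          _ = mn := himn_eq
    have hspan' : (a :: t)[t.length]'(by simp) - a = (t.length : Int) := by
      have e1 : mx = (a :: t)[t.length]'(by simp) := le_antisymm hmx_le hmx_ge
      have e2 : mn = a := le_antisymm hmn_le hmn_ge
      omega
    -- squeeze: every element equals a + its index
    apply List.ext_getElem (by simp [rangeFrom_length])
    intro i hi hi2
    rw [rangeFrom_getElem a (t.length + 1) i (by simpa using hi)]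
    have hi' : i < t.length + 1 := by simpa using hi
    have h1 : a + (i : Int) ≤ (a :: t)[i]'hi := by
      have := hgetmono 0 i (by omega) hi
      simpa using this
    have h2 : (a :: t)[i]'hi + ((t.length - i : Nat) : Int) ≤ (a :: t)[t.length]'(by simp) :=
      hgetmono i t.length (by omega) (by simp)
    have hcast : ((t.length - i : Nat) : Int) = (t.length : Int) - (i : Int) := by omega
    omega
  · intro hR
    -- the sorted list is a consecutive range: both of A's checks hold
    have hvperm' : v.Perm (rangeFrom a (t.length + 1)) := by
      rw [← hR]; exact hperm.symm
    have hndR : (rangeFrom a (t.length + 1)).Nodup :=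
      (rangeFrom_pairwise_lt a (t.length + 1)).imp (fun h => ne_of_lt h)
    have hmemv : ∀ x, x ∈ v ↔ ∃ i : Nat, i < t.length + 1 ∧ x = a + i := by
      intro x; rw [hvperm'.mem_iff, mem_rangeFrom]
    constructor
    · -- span check
      obtain ⟨imx, himx, hmxv⟩ := (hmemv mx).mp hmxmem
      obtain ⟨imn, himn, hmnv⟩ := (hmemv mn).mp hmnmem
      have htop : a + ((t.length : Nat) : Int) ≤ mx :=
        hmxmax _ ((hmemv _).mpr ⟨t.length, by omega, rfl⟩)
      have hbot : mn ≤ a := hmnmin _ ((hmemv _).mpr ⟨0, by omega, by simp⟩)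
      have : mx = a + (t.length : Int) := by omega
      have : mn = a := by omega
      omega
    · exact hvperm'.nodup_iff.mpr hndR


-- ===== VERDICT (by name: the statement is the Claim_ definition above) =====
theorem is_run_spec : Claim_equal_is_run := by
  intro sub_seq _ hpre
  unfold Spec_is_run is_run is_run_alt
  simp only []
  set v := sub_seq.map (fun s => PySem.Int.mod s 13) with hvdef
  have hv : v ≠ [] := by
    simp only [hvdef, Ne, List.map_eq_nil_iff]
    exact hpre
  cases hmx : PySem.List.max? v (fun x => x) with
  | none => exact absurd ((PySem.List.max?_eq_none_iff v _).mp hmx) hv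
  | some mx =>
  cases hmn : PySem.List.min? v (fun x => x) with
  | none => exact absurd ((PySem.List.min?_eq_none_iff v _).mp hmn) hv
  | some mn =>
  have hc := central v hv mx mn hmx hmn
  have hlv : v.length = sub_seq.length := by simp [hvdef]
  rw [PySem.List.slice_from_one]
  show (if mx - mn ≠ (sub_seq.length : Int) - 1 then false
        else if ((PySem.Set.ofList v).length : Int) ≠ (sub_seq.length : Int) then false else true)
      = ((PySem.List.sorted v (fun x => x) false).zip
          (PySem.List.sorted v (fun x => x) false).tail).all (fun p => p.2 - p.1 == 1)
  split_ifs with h1 h2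
  · cases hAll : ((PySem.List.sorted v (fun x => x) false).zip
        (PySem.List.sorted v (fun x => x) false).tail).all (fun p => p.2 - p.1 == 1) with
    | false => rfl
    | true => exact absurd (hlv ▸ (hc.mpr hAll).1) h1
  · cases hAll : ((PySem.List.sorted v (fun x => x) false).zip
        (PySem.List.sorted v (fun x => x) false).tail).all (fun p => p.2 - p.1 == 1) with
    | false => rfl
    | true =>
      have hn := (hc.mpr hAll).2
      exact absurd (by rw [hn, hlv]) h2
  · symm
    apply hc.mp
    refine ⟨by rw [hlv]; omega, ?_⟩
    have : ((PySem.Set.ofList v).length : Int) = (v.length : Int) := by rw [hlv]; omega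
    exact_mod_cast this
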